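-- pv_equiv track=rewrite | github.com/epfl-ml4ed/SkillThrills | protosp01/evaluation/preprocess.py | add_tags_to_words
-- ===== SOURCE A (Python) =====
-- def add_tags_to_words(words, boolean_values, begin_tag='@@', end_tag='##'):
--     result = []
--     in_span = False
--
--     for word, is_true in zip(words, boolean_values):
--         if is_true:
--             if not in_span:
--                 result.append(begin_tag)
--                 in_span = True
--             result.append(word)
--         else:
--             if in_span:
--                 result.append(end_tag)
--                 in_span = False
--             result.append(word)
--
--     if in_span:
--         result.append(end_tag)
--
--     return result
-- ===== SOURCE B (Python) =====
-- def add_tags_to_words(words, boolean_values, begin_tag='@@', end_tag='##'):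
--     pairs = list(zip(words, boolean_values))
--     result = []
--     i = 0
--     n = len(pairs)
--     while i < n:
--         key = bool(pairs[i][1])
--         j = i
--         while j < n and bool(pairs[j][1]) == key:
--             j += 1
--         run = [w for w, _ in pairs[i:j]]
--         if key:
--             result.append(begin_tag)
--             result.extend(run)
--             result.append(end_tag)
--         else:
--             result.extend(run)
--         i = j
--     return result
-- ===== Notes on version B (the rewrite author's own statement) =====
-- stated objective: alternative
-- what changed: Replaces the per-element in_span flag and branching with a run-grouping scan: B splits the zipped sequence into maximal runs of equal truthiness (two-pointer inner scan) and wraps each True run in begin/end tags as a block.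
import Mathlib
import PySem

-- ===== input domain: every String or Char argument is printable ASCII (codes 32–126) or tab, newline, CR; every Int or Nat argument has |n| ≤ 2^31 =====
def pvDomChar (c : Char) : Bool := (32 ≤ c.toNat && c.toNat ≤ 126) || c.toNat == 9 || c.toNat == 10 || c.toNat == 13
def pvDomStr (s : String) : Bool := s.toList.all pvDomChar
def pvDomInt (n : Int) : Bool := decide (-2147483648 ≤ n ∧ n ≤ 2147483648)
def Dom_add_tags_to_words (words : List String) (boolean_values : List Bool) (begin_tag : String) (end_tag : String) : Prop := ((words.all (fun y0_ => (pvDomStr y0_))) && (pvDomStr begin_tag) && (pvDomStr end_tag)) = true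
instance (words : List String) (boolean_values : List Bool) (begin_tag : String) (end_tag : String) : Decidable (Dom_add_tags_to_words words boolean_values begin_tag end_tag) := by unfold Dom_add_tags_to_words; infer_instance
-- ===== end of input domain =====

-- B replaces A's in_span flag and per-element branching by a run-grouping scan (alternative decomposition, same cost).

-- ===== PORT A =====
-- literal port of A: foldl over zip carrying (result, in_span), then close a trailing span
def add_tags_to_words (words : List String) (boolean_values : List Bool) (begin_tag : String) (end_tag : String) : List String :=
  let fin := (words.zip boolean_values).foldl
    (fun (st : List String × Bool) (p : String × Bool) =>
      if p.2 then
        (if st.2 then (st.1 ++ [p.1], true) else (st.1 ++ [begin_tag, p.1], true))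
      else
        (if st.2 then (st.1 ++ [end_tag, p.1], false) else (st.1 ++ [p.1], false)))
    ([], false)
  if fin.2 then fin.1 ++ [end_tag] else fin.1

-- ===== PORT B =====
-- pvTakeRun b l = (words of the maximal leading run of key b, remaining pairs)  (B's inner j-scan)
def pvTakeRun (b : Bool) : List (String × Bool) → List String × List (String × Bool)
  | [] => ([], [])
  | (w, k) :: rest =>
    if k == b then
      let p := pvTakeRun b rest
      (w :: p.1, p.2)
    else ([], (w, k) :: rest)

theorem pvTakeRun_len (b : Bool) : ∀ l : List (String × Bool), (pvTakeRun b l).2.length ≤ l.length := by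
  intro l
  induction l with
  | nil => simp [pvTakeRun]
  | cons hd tl ih =>
    obtain ⟨w, k⟩ := hd
    by_cases h : k = b <;> simp [pvTakeRun, h] <;> omega

-- B's outer loop: peel one maximal run at a time, wrap True runs in tags
def pvGroups (begin_tag end_tag : String) : List (String × Bool) → List String
  | [] => []
  | (w, b) :: rest =>
    let p := pvTakeRun b rest
    (if b then begin_tag :: (w :: p.1) ++ [end_tag] else w :: p.1) ++ pvGroups begin_tag end_tag p.2
termination_by l => l.length
decreasing_by
  simp only [List.length_cons]
  exact Nat.lt_succ_of_le (pvTakeRun_len b rest)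

def add_tags_to_words_alt (words : List String) (boolean_values : List Bool) (begin_tag : String) (end_tag : String) : List String :=
  pvGroups begin_tag end_tag (words.zip boolean_values)

-- ===== PRECONDITION & SPEC =====
def Spec_add_tags_to_words (words : List String) (boolean_values : List Bool) (begin_tag : String) (end_tag : String) (out : List String) : Prop := out = add_tags_to_words_alt words boolean_values begin_tag end_tag
instance (words : List String) (boolean_values : List Bool) (begin_tag : String) (end_tag : String) (out : List String) : Decidable (Spec_add_tags_to_words words boolean_values begin_tag end_tag out) := by unfold Spec_add_tags_to_words; infer_instance

-- ===== CLAIM (what is proved, stated in full; the proofs are below) =====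
def Claim_equal_add_tags_to_words : Prop := ∀ (words : List String) (boolean_values : List Bool) (begin_tag : String) (end_tag : String), Dom_add_tags_to_words words boolean_values begin_tag end_tag → Spec_add_tags_to_words words boolean_values begin_tag end_tag (add_tags_to_words words boolean_values begin_tag end_tag)

-- ===== LEMMAS AND PROOFS =====

-- forward-recursive characterisation of A's loop (flag = in_span)
def pvGoSpec (begin_tag end_tag : String) : Bool → List (String × Bool) → List String
  | flag, [] => if flag then [end_tag] else []
  | flag, (w, b) :: rest =>
    if b then (if flag then [w] else [begin_tag, w]) ++ pvGoSpec begin_tag end_tag true rest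
    else (if flag then [end_tag, w] else [w]) ++ pvGoSpec begin_tag end_tag false rest

theorem a_eq_goSpec (begin_tag end_tag : String) :
    ∀ (l : List (String × Bool)) (acc : List String) (flag : Bool),
      (let fin := l.foldl
        (fun (st : List String × Bool) (p : String × Bool) =>
          if p.2 then
            (if st.2 then (st.1 ++ [p.1], true) else (st.1 ++ [begin_tag, p.1], true))
          else
            (if st.2 then (st.1 ++ [end_tag, p.1], false) else (st.1 ++ [p.1], false)))
        (acc, flag)
       if fin.2 then fin.1 ++ [end_tag] else fin.1) = acc ++ pvGoSpec begin_tag end_tag flag l := by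
  intro l
  induction l with
  | nil => intro acc flag; cases flag <;> simp [pvGoSpec]
  | cons hd tl ih =>
    intro acc flag
    obtain ⟨w, b⟩ := hd
    cases b <;> cases flag <;> simp [pvGoSpec, List.foldl_cons, ih] <;> simp [List.append_assoc]

-- the triple run-invariant linking pvGoSpec to B's run-peeling recursion
theorem goSpec_eq_groups (begin_tag end_tag : String) :
    ∀ (n : ℕ) (l : List (String × Bool)), l.length ≤ n →
      (pvGoSpec begin_tag end_tag false l = pvGroups begin_tag end_tag l ∧
       pvGoSpec begin_tag end_tag true l =
         (pvTakeRun true l).1 ++ end_tag :: pvGroups begin_tag end_tag (pvTakeRun true l).2 ∧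
       pvGoSpec begin_tag end_tag false l =
         (pvTakeRun false l).1 ++ pvGroups begin_tag end_tag (pvTakeRun false l).2) := by
  intro n
  induction n with
  | zero =>
    intro l hl
    have : l = [] := List.eq_nil_of_length_eq_zero (Nat.le_zero.mp hl)
    subst this
    simp [pvGoSpec, pvGroups, pvTakeRun]
  | succ n ih =>
    intro l hl
    cases l with
    | nil => simp [pvGoSpec, pvGroups, pvTakeRun]
    | cons hd rest =>
      obtain ⟨w, b⟩ := hd
      have hr : rest.length ≤ n := by simpa using Nat.succ_le_succ_iff.mp hl
      have hrun : (pvTakeRun b rest).2.length ≤ n :=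
        le_trans (pvTakeRun_len b rest) hr
      obtain ⟨ih1, ih2, ih3⟩ := ih rest hr
      refine ⟨?_, ?_, ?_⟩
      · cases b with
        | true =>
          simp only [pvGoSpec, pvGroups, pvTakeRun]
          simp [ih2]
        | false =>
          simp only [pvGoSpec, pvGroups, pvTakeRun]
          simp [ih3]
      · cases b with
        | true =>
          simp only [pvGoSpec, pvTakeRun]
          simp [ih2]
        | false =>
          simp only [pvGoSpec, pvTakeRun]
          simp [pvGroups, pvTakeRun, ih3]
      · cases b with
        | true =>
          simp only [pvGoSpec, pvTakeRun]
          simp [pvGroups, pvTakeRun, ih2]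
        | false =>
          simp only [pvGoSpec, pvTakeRun]
          simp [ih3]

-- ===== VERDICT (by name: the statement is the Claim_ definition above) =====
theorem add_tags_to_words_spec : Claim_equal_add_tags_to_words := by
  intro words boolean_values begin_tag end_tag _
  unfold Spec_add_tags_to_words add_tags_to_words add_tags_to_words_alt
  have h := a_eq_goSpec begin_tag end_tag (words.zip boolean_values) [] false
  simp only at h
  rw [h]
  simp [(goSpec_eq_groups begin_tag end_tag (words.zip boolean_values).length
    (words.zip boolean_values) le_rfl).1]
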